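-- pv_equiv track=rewrite | github.com/knowledge-learning/ehealthkd-2020 | scripts/utils.py | _get_relative_ann
-- ===== SOURCE A (Python) =====
-- import bisect
-- from typing import List
--
-- def _get_relative_ann(spans, sentences_length: List[int]) -> int:
--     # find the sentence where this annotation is
--     i = bisect.bisect(sentences_length, spans[0][0])
--     # correct the annotation spans
--     if i > 0:
--         spans = [
--             (
--                 start - sentences_length[i - 1] - 1,
--                 end - sentences_length[i - 1] - 1,
--             )
--             for start, end in spans
--         ]
--         spans.sort(key=lambda t: t[0])
--     return i, spans
-- ===== SOURCE B (Python) =====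
-- import bisect
--
-- def _insort(acc, item):
--     # stable insertion into a list kept sorted by start: skip entries whose start <= item's
--     k = 0
--     while k < len(acc) and acc[k][0] <= item[0]:
--         k += 1
--     acc.insert(k, item)
--
-- def _get_relative_ann(spans, sentences_length):
--     i = bisect.bisect(sentences_length, spans[0][0])
--     if i == 0:
--         return 0, spans
--     offset = sentences_length[i - 1] + 1
--     result = []
--     for start, end in spans:
--         _insort(result, (start - offset, end - offset))
--     return i, result
-- ===== Notes on version B (the rewrite author's own statement) =====
-- stated objective: alternative
-- what changed: B replaces A's two staged passes (a comprehension shifting every span, then an in-place library sort) by a single pass that shifts each span as it goes and inserts it into a stable insertion-sorted accumulator, with an early return when the annotation lies in the first sentence.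
import Mathlib
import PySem

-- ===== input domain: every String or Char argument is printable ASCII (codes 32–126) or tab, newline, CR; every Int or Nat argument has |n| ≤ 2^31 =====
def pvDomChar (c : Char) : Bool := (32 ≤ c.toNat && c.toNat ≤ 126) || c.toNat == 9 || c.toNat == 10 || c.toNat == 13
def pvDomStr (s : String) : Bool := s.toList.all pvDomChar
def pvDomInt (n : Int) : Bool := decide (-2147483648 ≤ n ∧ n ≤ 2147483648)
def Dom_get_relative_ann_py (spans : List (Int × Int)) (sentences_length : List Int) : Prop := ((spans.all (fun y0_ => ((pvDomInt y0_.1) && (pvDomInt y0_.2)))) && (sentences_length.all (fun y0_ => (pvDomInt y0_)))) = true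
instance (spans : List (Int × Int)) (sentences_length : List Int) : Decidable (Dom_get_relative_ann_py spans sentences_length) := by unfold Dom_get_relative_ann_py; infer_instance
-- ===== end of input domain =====

-- B fuses A's two staged passes (shift comprehension, then in-place library sort) into one pass
-- that inserts each shifted span into a stable insertion-sorted accumulator (early return for i = 0).


-- ===== PORT A =====
-- i = bisect.bisect(sentences_length, spans[0][0]); if i > 0: shift every span by
-- sentences_length[i-1] + 1 via a comprehension and sort the shifted list in place by start.
def get_relative_ann_py (spans : List (Int × Int)) (sentences_length : List Int) : Int × (List (Int × Int)) :=
  match spans with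
  | [] => (0, [])   -- Python raises IndexError on spans[0]; Pre_ excludes it
  | sp0 :: _ =>
    let i : Nat := PySem.List.bisectRight sentences_length sp0.1
    if i > 0 then
      let spans' := spans.map (fun p =>
        (p.1 - PySem.List.pyGetD sentences_length ((i : Int) - 1) 0 - 1,
         p.2 - PySem.List.pyGetD sentences_length ((i : Int) - 1) 0 - 1))
      ((i : Int), PySem.List.sorted spans' (fun t => t.1) false)
    else ((i : Int), spans)

-- ===== PORT B =====
-- _insort: left scan skipping entries whose start <= item's start, insert there (stable).
def insortB (acc : List (Int × Int)) (item : Int × Int) : List (Int × Int) :=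
  match acc with
  | [] => [item]
  | y :: ys => if y.1 ≤ item.1 then y :: insortB ys item else item :: y :: ys

-- early return for i = 0; otherwise one pass over spans, shifting each span by the
-- precomputed offset and inserting it into the sorted accumulator.
def get_relative_ann_py_alt (spans : List (Int × Int)) (sentences_length : List Int) : Int × (List (Int × Int)) :=
  match spans with
  | [] => (0, [])   -- Python raises IndexError on spans[0]; Pre_ excludes it
  | sp0 :: _ =>
    let i : Nat := PySem.List.bisectRight sentences_length sp0.1
    if i = 0 then (0, spans)
    else
      let offset := PySem.List.pyGetD sentences_length ((i : Int) - 1) 0 + 1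
      ((i : Int), spans.foldl (fun acc p => insortB acc (p.1 - offset, p.2 - offset)) [])

-- ===== PRECONDITION & SPEC =====
-- Pre_ excludes only empty spans, on which A raises IndexError at spans[0].
def Pre_get_relative_ann_py (spans : List (Int × Int)) (sentences_length : List Int) : Prop :=
  spans ≠ []
instance (spans : List (Int × Int)) (sentences_length : List Int) : Decidable (Pre_get_relative_ann_py spans sentences_length) := by unfold Pre_get_relative_ann_py; infer_instance

def pvWitness_get_relative_ann_py : (List (Int × Int)) × List Int := ([(7, 9), (3, 4)], [2, 5, 8])

def Spec_get_relative_ann_py (spans : List (Int × Int)) (sentences_length : List Int) (out : Int × (List (Int × Int))) : Prop := out = get_relative_ann_py_alt spans sentences_length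
instance (spans : List (Int × Int)) (sentences_length : List Int) (out : Int × (List (Int × Int))) : Decidable (Spec_get_relative_ann_py spans sentences_length out) := by unfold Spec_get_relative_ann_py; infer_instance

-- ===== CLAIM (what is proved, stated in full; the proofs are below) =====
def Claim_equal_get_relative_ann_py : Prop := ∀ (spans : List (Int × Int)) (sentences_length : List Int), Dom_get_relative_ann_py spans sentences_length → Pre_get_relative_ann_py spans sentences_length → Spec_get_relative_ann_py spans sentences_length (get_relative_ann_py spans sentences_length)

-- ===== LEMMAS AND PROOFS =====

-- B's left-scan insertion is exactly the stable insertion step of PySem's insertion sort.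
theorem insortB_eq_insertBy (acc : List (Int × Int)) (x : Int × Int) :
    insortB acc x = PySem.List.insertBy (fun a b : Int × Int => decide (a.1 < b.1)) x acc := by
  induction acc with
  | nil => rfl
  | cons y ys ih =>
    simp only [insortB, PySem.List.insertBy, ih]
    by_cases h : x.1 < y.1
    · simp [h, not_le.mpr h]
    · simp [h, not_lt.mp h]

-- ===== VERDICT (by name: the statement is the Claim_ definition above) =====
theorem get_relative_ann_py_spec : Claim_equal_get_relative_ann_py := by
  intro spans sl _ hne
  unfold Spec_get_relative_ann_py
  match spans with
  | [] => exact absurd rfl hne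
  | sp0 :: rest =>
    simp only [get_relative_ann_py, get_relative_ann_py_alt]
    set i := PySem.List.bisectRight sl sp0.1 with hi
    by_cases h0 : i = 0
    · simp [h0]
    · simp only [h0, if_false, Nat.pos_of_ne_zero h0, if_true]
      rw [PySem.List.sorted_eq_foldl_insertBy, List.foldl_map]
      simp [insortB_eq_insertBy, sub_sub]
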